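-- pv_equiv track=rewrite | github.com/a19130616-lab/crossword-master | backend/generator/solver.py | validate_full_grid
-- ===== SOURCE A (Python) =====
-- def run_length(grid, r, c, dr, dc):
--     rows = len(grid)
--     cols = len(grid[0]) if rows else 0
--     length = 0
--     rr, cc = r, c
--     while 0 <= rr < rows and 0 <= cc < cols and grid[rr][cc] != '#':
--         length += 1
--         rr += dr
--         cc += dc
--     return length
--
-- def cell_word_lengths(grid, r, c):
--     cc = c
--     while cc > 0 and grid[r][cc - 1] != '#':
--         cc -= 1
--     across = run_length(grid, r, cc, 0, 1)
--     rr = r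
--     while rr > 0 and grid[rr - 1][c] != '#':
--         rr -= 1
--     down = run_length(grid, rr, c, 1, 0)
--     return across, down
--
-- def validate_full_grid(grid):
--     rows = len(grid)
--     cols = len(grid[0]) if rows else 0
--     for r in range(rows):
--         for c in range(cols):
--             if grid[r][c] == '#':
--                 continue
--             across, down = cell_word_lengths(grid, r, c)
--             if across < 3 and down < 3:
--                 return False
--     return True
-- ===== SOURCE B (Python) =====
-- def _row_runs(row):
--     # per-cell length of the maximal contiguous non-'#' run containing the cell ('#' cells get 0)
--     res = []
--     i = 0
--     n = len(row)
--     while i < n: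
--         if row[i] == '#':
--             res.append(0)
--             i += 1
--         else:
--             j = i
--             while j < n and row[j] != '#':
--                 j += 1
--             res.extend([j - i] * (j - i))
--             i = j
--     return res
--
-- def validate_full_grid(grid):
--     rows = len(grid)
--     cols = len(grid[0]) if rows else 0
--     rs = [row[:cols] for row in grid]
--     across = [_row_runs(row) for row in rs]
--     down = [_row_runs([row[c] for row in rs]) for c in range(cols)]
--     for r in range(rows):
--         row = rs[r]
--         for c in range(cols):
--             if row[c] != '#' and across[r][c] < 3 and down[c][r] < 3:
--                 return False
--     return True
-- ===== Notes on version B (the rewrite author's own statement) =====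
-- stated objective: faster
-- what changed: B precomputes per-cell run lengths for every row and every column in single sweeps (run-length tables) and then checks each cell by table lookup, instead of A's per-cell backward scan plus forward re-scan of its word.
-- outside the precondition, e.g. on validate_full_grid([['a', '#', 'b'], ['c']]): A returns False, B raises IndexError
import Mathlib
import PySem

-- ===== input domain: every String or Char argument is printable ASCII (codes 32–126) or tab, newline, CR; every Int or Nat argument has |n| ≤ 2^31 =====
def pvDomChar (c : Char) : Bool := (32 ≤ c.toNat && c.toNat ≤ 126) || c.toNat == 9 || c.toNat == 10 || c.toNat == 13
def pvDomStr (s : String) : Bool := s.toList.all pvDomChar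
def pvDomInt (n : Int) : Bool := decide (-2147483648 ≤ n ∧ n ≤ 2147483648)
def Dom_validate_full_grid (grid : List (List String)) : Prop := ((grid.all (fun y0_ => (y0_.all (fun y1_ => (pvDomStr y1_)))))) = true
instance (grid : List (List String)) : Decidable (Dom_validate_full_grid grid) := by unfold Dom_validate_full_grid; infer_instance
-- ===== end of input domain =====

-- B replaces A's per-cell backward+forward word scans by precomputed per-row and
-- per-column run-length tables built in single sweeps, then checks each cell by lookup.

-- ===== PORT A =====

-- grid[rr][cc] at provably non-negative, in-range indices (all of A's accesses are guarded so)
def pvCell (grid : List (List String)) (r c : Int) : String :=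
  PySem.List.pyGetD (PySem.List.pyGetD grid r []) c ""

-- the while loop of run_length; fuel rows+cols+1 strictly exceeds the step count for the
-- directions A actually uses ((0,1) and (1,0): each step increases rr+cc, bounded by rows+cols),
-- so the port is exact there
def run_length_aux (grid : List (List String)) (rows cols dr dc : Int) :
    Nat → Int → Int → Int → Int
  | 0, length, _, _ => length
  | fuel + 1, length, rr, cc =>
      if 0 ≤ rr ∧ rr < rows ∧ 0 ≤ cc ∧ cc < cols ∧ pvCell grid rr cc ≠ "#" then
        run_length_aux grid rows cols dr dc fuel (length + 1) (rr + dr) (cc + dc)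
      else length

def run_length (grid : List (List String)) (r c dr dc : Int) : Int :=
  let rows : Int := (grid.length : Int)
  let cols : Int := if grid.length = 0 then 0 else ((grid.headD []).length : Int)
  run_length_aux grid rows cols dr dc (grid.length + (grid.headD []).length + 1) 0 r c

-- 'while cc > 0 and grid[r][cc-1] != '#': cc -= 1'
def back_c (grid : List (List String)) (r : Int) (cc : Int) : Int :=
  if h : 0 < cc ∧ pvCell grid r (cc - 1) ≠ "#" then back_c grid r (cc - 1) else cc
termination_by cc.toNat
decreasing_by omega

-- 'while rr > 0 and grid[rr-1][c] != '#': rr -= 1'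
def back_r (grid : List (List String)) (c : Int) (rr : Int) : Int :=
  if h : 0 < rr ∧ pvCell grid (rr - 1) c ≠ "#" then back_r grid c (rr - 1) else rr
termination_by rr.toNat
decreasing_by omega

def cell_word_lengths (grid : List (List String)) (r c : Int) : Int × Int :=
  let cc := back_c grid r c
  let across := run_length grid r cc 0 1
  let rr := back_r grid c r
  let down := run_length grid rr c 1 0
  (across, down)

def loop_c (grid : List (List String)) (r : Int) : List Int → Bool
  | [] => true
  | c :: rest =>
      if pvCell grid r c = "#" then loop_c grid r rest
      else
        let ad := cell_word_lengths grid r c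
        if ad.1 < 3 ∧ ad.2 < 3 then false
        else loop_c grid r rest

def loop_r (grid : List (List String)) (cs : List Int) : List Int → Bool
  | [] => true
  | r :: rest => if loop_c grid r cs = false then false else loop_r grid cs rest

def validate_full_grid (grid : List (List String)) : Bool :=
  let rows : Int := (grid.length : Int)
  let cols : Int := if grid.length = 0 then 0 else ((grid.headD []).length : Int)
  loop_r grid (PySem.List.pyRange 0 cols 1) (PySem.List.pyRange 0 rows 1)

-- ===== PORT B =====

-- per-cell length of the maximal contiguous non-'#' run containing the cell ('#' cells get 0)
def rowRuns : List String → List Nat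
  | [] => []
  | x :: xs =>
      if h : x = "#" then 0 :: rowRuns xs
      else
        let n := ((x :: xs).takeWhile (fun s => s ≠ "#")).length
        List.replicate n n ++ rowRuns ((x :: xs).drop n)
termination_by L => L.length
decreasing_by
  · simp
  · simp only [List.length_drop]
    have hn : 0 < ((x :: xs).takeWhile (fun s => s ≠ "#")).length := by
      simp [List.takeWhile_cons, h]
    simp only [List.length_cons] at *
    omega

def validate_full_grid_alt (grid : List (List String)) : Bool :=
  let cols := if grid.length = 0 then 0 else (grid.headD []).length
  let rs := grid.map (fun row => row.take cols)
  let across := rs.map rowRuns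
  let down := (List.range cols).map (fun c => rowRuns (rs.map (fun row => row.getD c "")))
  (List.range grid.length).all (fun r =>
    let row := rs.getD r []
    (List.range cols).all (fun c =>
      !(decide (row.getD c "" ≠ "#") && decide ((across.getD r []).getD c 0 < 3)
          && decide ((down.getD c []).getD r 0 < 3))))

-- ===== PRECONDITION & SPEC =====
-- Pre_ excludes ragged grids (a row shorter than the first row): there A reads grid[r][c] out of
-- range and raises IndexError, unless it happens to find an invalid cell first and returns False
-- early; B's column construction raises IndexError on all such grids.
def Pre_validate_full_grid (grid : List (List String)) : Prop :=
  ∀ row ∈ grid, (grid.headD []).length ≤ row.length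
instance (grid : List (List String)) : Decidable (Pre_validate_full_grid grid) := by
  unfold Pre_validate_full_grid; infer_instance

def pvWitness_validate_full_grid : List (List String) :=
  [["A", "B", "C"], ["#", "B", "C"], ["A", "B", "C"]]

def Spec_validate_full_grid (grid : List (List String)) (out : Bool) : Prop :=
  out = validate_full_grid_alt grid
instance (grid : List (List String)) (out : Bool) : Decidable (Spec_validate_full_grid grid out) := by
  unfold Spec_validate_full_grid; infer_instance

-- ===== CLAIM (what is proved, stated in full; the proofs are below) =====
def Claim_equal_validate_full_grid : Prop :=
  ∀ (grid : List (List String)), Dom_validate_full_grid grid →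
    Pre_validate_full_grid grid →
    Spec_validate_full_grid grid (validate_full_grid grid)

-- ===== LEMMAS AND PROOFS =====

-- forward run length from position s (A's run_length, in pure form on one line/column)
def fwdN (L : List String) (s : Nat) : Nat :=
  if h : s < L.length ∧ L.getD s "" ≠ "#" then fwdN L (s + 1) + 1 else 0
termination_by L.length - s
decreasing_by omega

-- backward scan to the start of the run containing i (A's while cc > 0 …, in pure form)
def backN (L : List String) : Nat → Nat
  | 0 => 0
  | i + 1 => if L.getD i "" ≠ "#" then backN L i else i + 1

theorem fwdN_cons (x : String) (xs : List String) (s : Nat) :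
    fwdN (x :: xs) (s + 1) = fwdN xs s := by
  fun_induction fwdN xs s with
  | case1 s hc ih =>
      rw [fwdN]
      have hcond : s + 1 < (x :: xs).length ∧ (x :: xs).getD (s + 1) "" ≠ "#" := by
        simp only [List.length_cons, List.getD_cons_succ]
        exact ⟨by omega, hc.2⟩
      rw [dif_pos hcond, ih]
  | case2 s hc =>
      rw [fwdN]
      rw [dif_neg (by
        simp only [List.length_cons, List.getD_cons_succ]
        intro hcon
        exact hc ⟨by omega, hcon.2⟩)]

theorem fwdN_zero (L : List String) :
    fwdN L 0 = (L.takeWhile (fun s => s ≠ "#")).length := by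
  induction L with
  | nil => rw [fwdN]; simp
  | cons x xs ih =>
      by_cases hx : x = "#"
      · rw [fwdN, dif_neg (by simp [hx])]
        simp [List.takeWhile_cons, hx]
      · rw [fwdN, dif_pos (by simp [hx])]
        have h1 : (0 : Nat) + 1 = 1 := rfl
        rw [show (0 : Nat) + 1 = 0 + 1 from rfl, fwdN_cons, ih]
        simp [List.takeWhile_cons, hx]

theorem fwdN_append (P Q : List String) (s : Nat) :
    fwdN (P ++ Q) (P.length + s) = fwdN Q s := by
  induction P with
  | nil => simp
  | cons x P ih =>
      have h : (x :: P).length + s = (P.length + s) + 1 := by simp; omega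
      rw [h, List.cons_append, fwdN_cons, ih]

theorem backN_cons_hash (xs : List String) (j : Nat) :
    backN ("#" :: xs) (j + 1) = backN xs j + 1 := by
  induction j with
  | zero => simp [backN]
  | succ j ih =>
      conv_lhs => rw [backN]
      conv_rhs => rw [backN]
      simp only [List.getD_cons_succ]
      split_ifs with h
      · exact ih
      · rfl

theorem backN_append (P Q : List String) (hQ : Q.getD 0 "" = "#") (j : Nat) (hj : 1 ≤ j) :
    backN (P ++ Q) (P.length + j) = P.length + backN Q j := by
  obtain ⟨j, rfl⟩ : ∃ j', j = j' + 1 := ⟨j - 1, by omega⟩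
  clear hj
  induction j with
  | zero =>
      have h0 : (P ++ Q).getD P.length "" = "#" := by
        rw [List.getD_append_right P Q "" P.length (le_refl _)]
        simpa using hQ
      simp only [Nat.zero_add]
      conv_lhs => rw [backN]
      conv_rhs => rw [backN]
      rw [if_neg (fun hne => hne h0), if_neg (fun hne => hne hQ)]
  | succ j ih =>
      have h1 : P.length + (j + 2) = (P.length + (j + 1)) + 1 := by omega
      rw [h1]
      conv_lhs => rw [backN]
      conv_rhs => rw [backN]
      have h2 : (P ++ Q).getD (P.length + (j + 1)) "" = Q.getD (j + 1) "" := by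
        rw [List.getD_append_right P Q "" _ (by omega)]
        congr 1
        omega
      rw [h2]
      split_ifs with h
      · exact ih
      · omega

theorem backN_zero_of_run (L : List String) (i : Nat)
    (h : ∀ j, j < i → L.getD j "" ≠ "#") : backN L i = 0 := by
  induction i with
  | zero => rfl
  | succ i ih =>
      simp only [backN]
      rw [if_pos (h i (by omega))]
      exact ih (fun j hj => h j (by omega))

theorem rowRuns_getD (L : List String) :
    ∀ i, i < L.length → L.getD i "" ≠ "#" →
    (rowRuns L).getD i 0 = fwdN L (backN L i) := by
  fun_induction rowRuns L with
  | case1 => intro i hi; simp at hi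
  | case2 a b =>
      intro i hi hne
      match i with
      | 0 => simp at hne
      | j + 1 =>
          have hj : j < a.length := by simpa using hi
          have hne' : a.getD j "" ≠ "#" := by simpa using hne
          rw [List.getD_cons_succ, b j hj hne', backN_cons_hash, fwdN_cons]
  | case3 a b c d =>
      intro i hi hne
      rename_i ih
      set p : String → Bool := (fun s => decide (s ≠ "#")) with hp
      set L : List String := a :: b with hL
      have hd : d = (List.takeWhile p L).length := rfl
      have hdle : d ≤ L.length := hd ▸ (List.takeWhile_prefix p).length_le
      obtain ⟨t, ht⟩ := List.takeWhile_prefix (l := L) p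
      have hrun : ∀ j, j < d → L.getD j "" ≠ "#" := by
        intro j hjd
        have hjlen : j < L.length := by omega
        have h1 : L.getD j "" = (List.takeWhile p L).getD j "" := by
          conv_lhs => rw [← ht]
          rw [List.getD_append _ _ _ j (by omega)]
        have hmem : (List.takeWhile p L).getD j "" ∈ List.takeWhile p L := by
          rw [List.getD_eq_getElem?_getD, List.getElem?_eq_getElem (by omega)]
          exact List.getElem_mem _
        have := List.mem_takeWhile_imp hmem
        rw [h1]
        simpa [hp] using this
      have hD : List.drop d L = List.dropWhile p L := by
        conv_lhs => rw [← List.takeWhile_append_dropWhile (p := p) (l := L), hd]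
        exact List.drop_left
      by_cases hcase : i < d
      · rw [List.getD_append _ _ _ i (by simpa using hcase), List.getD_replicate _ hcase]
        rw [backN_zero_of_run L i (fun j hj => hrun j (by omega)), fwdN_zero]
      · push_neg at hcase
        have hdlt : d < L.length := by omega
        have hD0 : (List.drop d L).getD 0 "" = "#" := by
          rw [hD]
          have hne2 : List.dropWhile p L ≠ [] := by
            intro hnil
            have := congrArg List.length (List.takeWhile_append_dropWhile (p := p) (l := L))
            simp [hnil, ← hd] at this
            omega
          have := List.head_dropWhile_not p hne2
          rw [List.getD_eq_getElem?_getD, List.getElem?_eq_getElem (by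
            cases h' : List.dropWhile p L with
            | nil => exact absurd h' hne2
            | cons y ys => simp [h']), List.getElem_zero_eq_head]
          simpa [hp] using this
        have hgetdrop : ∀ k, (List.drop d L).getD k "" = L.getD (d + k) "" := by
          intro k
          rw [List.getD_eq_getElem?_getD, List.getD_eq_getElem?_getD, List.getElem?_drop]
        have hj1 : 1 ≤ i - d := by
          rcases Nat.eq_or_lt_of_le hcase with heq | hlt
          · exfalso
            have h0 := hgetdrop 0
            rw [Nat.add_zero] at h0
            exact hne (by rw [← heq, ← h0]; exact hD0)
          · omega
        have hidj : i = d + (i - d) := by omega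
        rw [List.getD_append_right _ _ _ _ (by simpa using hcase)]
        have hlen : (List.replicate d d).length = d := by simp
        rw [hlen]
        have hjD : i - d < (List.drop d L).length := by
          rw [List.length_drop]
          omega
        have hneD : (List.drop d L).getD (i - d) "" ≠ "#" := by
          rw [hgetdrop, ← hidj]
          exact hne
        rw [ih (i - d) hjD hneD]
        have hP : (List.takeWhile p L).length = d := hd.symm
        have hback : backN L i = d + backN (List.drop d L) (i - d) := by
          conv_lhs => rw [← ht, hidj, ← hP]
          have ht' : t = List.drop d L := by
            have := congrArg (List.drop d) ht
            rw [← this, hd, List.drop_left]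
          rw [ht']
          rw [backN_append _ _ hD0 _ hj1, hP]
        rw [hback]
        have ht' : t = List.drop d L := by
          have := congrArg (List.drop d) ht
          rw [← this, hd, List.drop_left]
        have hfwd : fwdN L (d + backN (List.drop d L) (i - d)) =
            fwdN (List.drop d L) (backN (List.drop d L) (i - d)) := by
          calc fwdN L (d + backN (List.drop d L) (i - d))
              = fwdN (List.takeWhile p L ++ t)
                  ((List.takeWhile p L).length + backN (List.drop d L) (i - d)) := by
                rw [ht, hP]
            _ = fwdN t (backN (List.drop d L) (i - d)) := fwdN_append _ _ _
            _ = fwdN (List.drop d L) (backN (List.drop d L) (i - d)) := by rw [ht']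
        rw [hfwd]

-- the across line of row r, truncated to the first row's width (A never reads past it)
def rowL (grid : List (List String)) (r : Nat) : List String :=
  (grid.getD r []).take (grid.headD []).length

-- the down line of column c
def colL (grid : List (List String)) (c : Nat) : List String :=
  grid.map (fun row => (row.take (grid.headD []).length).getD c "")

theorem rowL_length (grid : List (List String)) (hPre : Pre_validate_full_grid grid)
    (r : Nat) (hr : r < grid.length) :
    (rowL grid r).length = (grid.headD []).length := by
  unfold rowL
  rw [List.length_take]
  have hg : grid.getD r [] = grid[r] := by
    rw [List.getD_eq_getElem?_getD, List.getElem?_eq_getElem hr, Option.getD_some]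
  have hmem : grid.getD r [] ∈ grid := by rw [hg]; exact List.getElem_mem hr
  have := hPre _ hmem
  omega

theorem colL_length (grid : List (List String)) (c : Nat) :
    (colL grid c).length = grid.length := by
  simp [colL]

theorem pvCell_eq_row (grid : List (List String)) (hPre : Pre_validate_full_grid grid)
    (r : Nat) (hr : r < grid.length) (cc : Int) (h0 : 0 ≤ cc)
    (hlt : cc < ((grid.headD []).length : Int)) :
    pvCell grid (r : Int) cc = (rowL grid r).getD cc.toNat "" := by
  obtain ⟨c, rfl⟩ : ∃ c : Nat, cc = (c : Int) := ⟨cc.toNat, by omega⟩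
  unfold pvCell rowL
  rw [PySem.List.pyGetD_natCast, PySem.List.pyGetD_natCast, Int.toNat_natCast]
  have hcm : c < (grid.headD []).length := by exact_mod_cast hlt
  have hcm2 : c < (grid.head?.getD []).length := by
    have h := List.headD_eq_head?_getD (l := grid) (a := ([] : List String))
    rw [← h]
    exact hcm
  simp [List.getD_eq_getElem?_getD, List.getElem?_take, hcm, hcm2]

theorem colL_getD (grid : List (List String)) (r c : Nat) (hr : r < grid.length) :
    (colL grid c).getD r "" = (rowL grid r).getD c "" := by
  unfold colL rowL
  have hg : grid.getD r [] = grid[r] := by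
    rw [List.getD_eq_getElem?_getD, List.getElem?_eq_getElem hr, Option.getD_some]
  rw [List.getD_eq_getElem?_getD, List.getElem?_map, List.getElem?_eq_getElem hr]
  simp only [Option.map_some, Option.getD_some]
  rw [hg]

theorem pvCell_eq_col (grid : List (List String)) (hPre : Pre_validate_full_grid grid)
    (c : Nat) (hc : c < (grid.headD []).length) (rr : Int) (h0 : 0 ≤ rr)
    (hlt : rr < (grid.length : Int)) :
    pvCell grid rr (c : Int) = (colL grid c).getD rr.toNat "" := by
  obtain ⟨r, rfl⟩ : ∃ r : Nat, rr = (r : Int) := ⟨rr.toNat, by omega⟩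
  have hr : r < grid.length := by exact_mod_cast hlt
  rw [Int.toNat_natCast, colL_getD grid r c hr]
  rw [pvCell_eq_row grid hPre r hr (c : Int) (by omega) (by exact_mod_cast hc)]
  rw [Int.toNat_natCast]

theorem run_aux_across (grid : List (List String)) (hPre : Pre_validate_full_grid grid)
    (r : Nat) (hr : r < grid.length) :
    ∀ (fuel : Nat) (cc len : Int), 0 ≤ cc →
      (grid.headD []).length - cc.toNat < fuel →
      run_length_aux grid (grid.length : Int) ((grid.headD []).length : Int) 0 1 fuel len (r : Int) cc
        = len + (fwdN (rowL grid r) cc.toNat : Int) := by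
  have hlenL : (rowL grid r).length = (grid.headD []).length := rowL_length grid hPre r hr
  intro fuel
  induction fuel with
  | zero => intro cc len h0 hf; omega
  | succ fuel ih =>
      intro cc len h0 hf
      rw [run_length_aux]
      by_cases hc : cc < ((grid.headD []).length : Int) ∧ pvCell grid (r : Int) cc ≠ "#"
      · have hcell := pvCell_eq_row grid hPre r hr cc h0 hc.1
        rw [if_pos ⟨Int.natCast_nonneg r, by exact_mod_cast hr, h0, hc.1, hc.2⟩]
        simp only [Int.add_zero]
        rw [ih (cc + 1) (len + 1) (by omega) (by omega)]
        conv_rhs => rw [fwdN]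
        rw [dif_pos ⟨by omega, by rw [← hcell]; exact hc.2⟩]
        have ht : (cc + 1).toNat = cc.toNat + 1 := by omega
        rw [ht]
        push_cast
        ring
      · rw [if_neg (fun h5 => hc ⟨h5.2.2.2.1, h5.2.2.2.2⟩)]
        conv_rhs => rw [fwdN]
        rw [dif_neg (by
          intro hcon
          apply hc
          have hclt : cc < ((grid.headD []).length : Int) := by omega
          exact ⟨hclt, by rw [pvCell_eq_row grid hPre r hr cc h0 hclt]; exact hcon.2⟩)]
        simp

theorem run_aux_down (grid : List (List String)) (hPre : Pre_validate_full_grid grid)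
    (c : Nat) (hc : c < (grid.headD []).length) :
    ∀ (fuel : Nat) (rr len : Int), 0 ≤ rr →
      grid.length - rr.toNat < fuel →
      run_length_aux grid (grid.length : Int) ((grid.headD []).length : Int) 1 0 fuel len rr (c : Int)
        = len + (fwdN (colL grid c) rr.toNat : Int) := by
  have hlenL : (colL grid c).length = grid.length := colL_length grid c
  intro fuel
  induction fuel with
  | zero => intro rr len h0 hf; omega
  | succ fuel ih =>
      intro rr len h0 hf
      rw [run_length_aux]
      by_cases hcnd : rr < (grid.length : Int) ∧ pvCell grid rr (c : Int) ≠ "#"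
      · have hcell := pvCell_eq_col grid hPre c hc rr h0 hcnd.1
        rw [if_pos ⟨h0, hcnd.1, by omega, by exact_mod_cast hc, hcnd.2⟩]
        simp only [Int.add_zero]
        rw [ih (rr + 1) (len + 1) (by omega) (by omega)]
        conv_rhs => rw [fwdN]
        rw [dif_pos ⟨by omega, by rw [← hcell]; exact hcnd.2⟩]
        have ht : (rr + 1).toNat = rr.toNat + 1 := by omega
        rw [ht]
        push_cast
        ring
      · rw [if_neg (fun h5 => hcnd ⟨h5.2.1, h5.2.2.2.2⟩)]
        conv_rhs => rw [fwdN]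
        rw [dif_neg (by
          intro hcon
          apply hcnd
          have hrlt : rr < (grid.length : Int) := by omega
          exact ⟨hrlt, by rw [pvCell_eq_col grid hPre c hc rr h0 hrlt]; exact hcon.2⟩)]
        simp

theorem back_c_eq (grid : List (List String)) (hPre : Pre_validate_full_grid grid)
    (r : Nat) (hr : r < grid.length) :
    ∀ (k : Nat) (cc : Int), cc.toNat = k → 0 ≤ cc → cc ≤ ((grid.headD []).length : Int) →
      back_c grid (r : Int) cc = ((backN (rowL grid r) cc.toNat : Nat) : Int) := by
  intro k
  induction k with
  | zero =>
      intro cc hk h0 hle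
      obtain rfl : cc = 0 := by omega
      rw [back_c, dif_neg (by rintro ⟨h, -⟩; omega)]
      simp [backN]
  | succ k ih =>
      intro cc hk h0 hle
      have hpos : (0 : Int) < cc := by omega
      have hcell := pvCell_eq_row grid hPre r hr (cc - 1) (by omega) (by omega)
      have htn : (cc - 1).toNat = k := by omega
      rw [back_c]
      rw [hk]
      conv_rhs => rw [backN]
      by_cases hb : (rowL grid r).getD k "" ≠ "#"
      · rw [dif_pos ⟨hpos, by rw [hcell, htn]; exact hb⟩]
        rw [ih (cc - 1) htn (by omega) (by omega), htn]
        rw [if_pos hb]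
      · rw [dif_neg (by rintro ⟨-, hne⟩; rw [hcell, htn] at hne; exact hb hne)]
        rw [if_neg hb]
        omega
  
theorem back_r_eq (grid : List (List String)) (hPre : Pre_validate_full_grid grid)
    (c : Nat) (hc : c < (grid.headD []).length) :
    ∀ (k : Nat) (rr : Int), rr.toNat = k → 0 ≤ rr → rr ≤ (grid.length : Int) →
      back_r grid (c : Int) rr = ((backN (colL grid c) rr.toNat : Nat) : Int) := by
  intro k
  induction k with
  | zero =>
      intro rr hk h0 hle
      obtain rfl : rr = 0 := by omega
      rw [back_r, dif_neg (by rintro ⟨h, -⟩; omega)]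
      simp [backN]
  | succ k ih =>
      intro rr hk h0 hle
      have hpos : (0 : Int) < rr := by omega
      have hcell := pvCell_eq_col grid hPre c hc (rr - 1) (by omega) (by omega)
      have htn : (rr - 1).toNat = k := by omega
      rw [back_r]
      rw [hk]
      conv_rhs => rw [backN]
      by_cases hb : (colL grid c).getD k "" ≠ "#"
      · rw [dif_pos ⟨hpos, by rw [hcell, htn]; exact hb⟩]
        rw [ih (rr - 1) htn (by omega) (by omega), htn]
        rw [if_pos hb]
      · rw [dif_neg (by rintro ⟨-, hne⟩; rw [hcell, htn] at hne; exact hb hne)]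
        rw [if_neg hb]
        omega

theorem cwl_eq (grid : List (List String)) (hPre : Pre_validate_full_grid grid)
    (r c : Nat) (hr : r < grid.length) (hc : c < (grid.headD []).length) :
    cell_word_lengths grid (r : Int) (c : Int) =
      ((fwdN (rowL grid r) (backN (rowL grid r) c) : Int),
       (fwdN (colL grid c) (backN (colL grid c) r) : Int)) := by
  have hn : grid.length ≠ 0 := by omega
  unfold cell_word_lengths run_length
  simp only [if_neg hn]
  have hbc : back_c grid (r : Int) (c : Int) = ((backN (rowL grid r) c : Nat) : Int) := by
    have := back_c_eq grid hPre r hr c (c : Int) (by omega) (by omega) (by exact_mod_cast hc.le)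
    rwa [Int.toNat_natCast] at this
  have hbr : back_r grid (c : Int) (r : Int) = ((backN (colL grid c) r : Nat) : Int) := by
    have := back_r_eq grid hPre c hc r (r : Int) (by omega) (by omega) (by exact_mod_cast hr.le)
    rwa [Int.toNat_natCast] at this
  rw [hbc, hbr]
  rw [run_aux_across grid hPre r hr _ _ 0 (by omega) (by omega)]
  rw [run_aux_down grid hPre c hc _ _ 0 (by omega) (by omega)]
  rw [Int.toNat_natCast, Int.toNat_natCast]
  simp

theorem all_congr_mem {α : Type} (l : List α) (p q : α → Bool)
    (h : ∀ a ∈ l, p a = q a) : l.all p = l.all q := by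
  induction l with
  | nil => rfl
  | cons x xs ih =>
      simp only [List.all_cons]
      rw [h x (by simp), ih (fun a ha => h a (by simp [ha]))]

theorem loop_c_eq (grid : List (List String)) (rI : Int) (cs : List Int) :
    loop_c grid rI cs = cs.all (fun c =>
      if pvCell grid rI c = "#" then true
      else !(decide ((cell_word_lengths grid rI c).1 < 3 ∧ (cell_word_lengths grid rI c).2 < 3))) := by
  induction cs with
  | nil => rfl
  | cons c cs ih =>
      rw [loop_c, List.all_cons]
      by_cases h1 : pvCell grid rI c = "#"
      · rw [if_pos h1, if_pos h1, ih]
        simp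
      · rw [if_neg h1, if_neg h1]
        by_cases h2 : (cell_word_lengths grid rI c).1 < 3 ∧ (cell_word_lengths grid rI c).2 < 3
        · rw [if_pos h2]
          simp [h2]
        · rw [if_neg h2, ih]
          simp [h2]

theorem loop_r_eq (grid : List (List String)) (cs : List Int) :
    ∀ rs, loop_r grid cs rs = rs.all (fun r => loop_c grid r cs) := by
  intro rs
  induction rs with
  | nil => rfl
  | cons r rs ih =>
      rw [loop_r, List.all_cons]
      cases h : loop_c grid r cs
      · simp [h]
      · simp [h, ih]

-- ===== VERDICT (by name: the statement is the Claim_ definition above) =====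
theorem validate_full_grid_spec : Claim_equal_validate_full_grid := by
  intro grid hDom hPre
  unfold Spec_validate_full_grid
  by_cases hn : grid.length = 0
  · obtain rfl : grid = [] := List.eq_nil_of_length_eq_zero hn
    decide
  · simp only [validate_full_grid, validate_full_grid_alt, if_neg hn]
    rw [loop_r_eq, PySem.List.pyRange_zero_nat, PySem.List.pyRange_zero_nat, List.all_map]
    apply all_congr_mem
    intro r hrmem
    have hr : r < grid.length := List.mem_range.mp hrmem
    simp only [Function.comp]
    rw [loop_c_eq, List.all_map]
    apply all_congr_mem
    intro c hcmem
    have hc : c < (grid.headD []).length := List.mem_range.mp hcmem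
    simp only [Function.comp]
    -- identify the table entries
    have hgr : grid.getD r [] = grid[r] := by
      rw [List.getD_eq_getElem?_getD, List.getElem?_eq_getElem hr, Option.getD_some]
    have e1 : (grid.map (fun row => row.take (grid.headD []).length)).getD r [] = rowL grid r := by
      rw [List.getD_eq_getElem?_getD, List.getElem?_map, List.getElem?_eq_getElem hr]
      simp only [Option.map_some, Option.getD_some]
      rw [rowL, hgr]
    have e2 : ((grid.map (fun row => row.take (grid.headD []).length)).map rowRuns).getD r []
        = rowRuns (rowL grid r) := by
      rw [List.getD_eq_getElem?_getD, List.getElem?_map, List.getElem?_map,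
        List.getElem?_eq_getElem hr]
      simp only [Option.map_some, Option.getD_some]
      rw [rowL, hgr]
    have e3 : ((List.range (grid.headD []).length).map (fun c =>
          rowRuns ((grid.map (fun row => row.take (grid.headD []).length)).map
            (fun row => row.getD c "")))).getD c []
        = rowRuns (colL grid c) := by
      rw [PySem.List.getD_map_range _ _ _ _ hc]
      rw [List.map_map]
      rfl
    have e4 : pvCell grid (r : Int) (c : Int) = (rowL grid r).getD c "" := by
      have := pvCell_eq_row grid hPre r hr (c : Int) (by omega) (by exact_mod_cast hc)
      rwa [Int.toNat_natCast] at this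
    rw [e1, e2, e3, e4]
    by_cases hcell : (rowL grid r).getD c "" = "#"
    · rw [if_pos hcell]
      have hcell2 : (rowL grid r)[c]?.getD "" = "#" := by
        rw [← List.getD_eq_getElem?_getD]; exact hcell
      simp [hcell, hcell2]
    · rw [if_neg hcell]
      have hcell2 : ¬ (rowL grid r)[c]?.getD "" = "#" := by
        rw [← List.getD_eq_getElem?_getD]; exact hcell
      rw [cwl_eq grid hPre r c hr hc]
      have hrl : c < (rowL grid r).length := by rw [rowL_length grid hPre r hr]; omega
      have hcl : r < (colL grid c).length := by rw [colL_length]; omega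
      have hcne : (colL grid c).getD r "" ≠ "#" := by
        rw [colL_getD grid r c hr]; exact hcell
      rw [rowRuns_getD (rowL grid r) c hrl hcell,
          rowRuns_getD (colL grid c) r hcl hcne]
      have hca : ∀ a : Nat, (((a : Nat) : Int) < 3) ↔ a < 3 := by
        intro a; exact_mod_cast Iff.rfl
      by_cases ha : fwdN (rowL grid r) (backN (rowL grid r) c) < 3 <;>
        by_cases hd : fwdN (colL grid c) (backN (colL grid c) r) < 3 <;>
          simp [ha, hd, hca, hcell, hcell2]
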